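-- pv_equiv track=rewrite | github.com/yyeongeun/codingtest | programmers/명예의전당1.py | solution
-- ===== SOURCE A (Python) =====
-- def solution(k, score):
--     answer = []
--     stack = [] #명예의 전당 리스트
--     for s in score:
--         if len(stack) < k: # 상위 k번째 이내이면 명예의 전당
--             stack.append(s)
--         else:
--             if min(stack) < s:
--                 stack.remove(min(stack))
--                 stack.append(s)
--
--         answer.append(min(stack))
--     return answer
-- ===== SOURCE B (Python) =====
-- def solution(k, score):
--     answer = []
--     top = []  # ascending sorted list of current hall-of-fame scores (size <= k)
--     for s in score:
--         if len(top) < k: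
--             _insort(top, s)
--         elif top[0] < s:
--             top.pop(0)
--             _insort(top, s)
--         answer.append(top[0])
--     return answer
--
-- def _insort(top, s):
--     i = 0
--     while i < len(top) and top[i] < s:
--         i += 1
--     top.insert(i, s)
-- ===== Notes on version B (the rewrite author's own statement) =====
-- stated objective: alternative
-- what changed: B keeps the hall of fame as an ascending sorted list (ordered insertion, drop the head on replacement, min is the head), replacing A's repeated min() scans and remove() over an unordered list.
-- outside the precondition, e.g. on solution(0, [3]): A raises ValueError, B raises IndexError
import Mathlib
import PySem

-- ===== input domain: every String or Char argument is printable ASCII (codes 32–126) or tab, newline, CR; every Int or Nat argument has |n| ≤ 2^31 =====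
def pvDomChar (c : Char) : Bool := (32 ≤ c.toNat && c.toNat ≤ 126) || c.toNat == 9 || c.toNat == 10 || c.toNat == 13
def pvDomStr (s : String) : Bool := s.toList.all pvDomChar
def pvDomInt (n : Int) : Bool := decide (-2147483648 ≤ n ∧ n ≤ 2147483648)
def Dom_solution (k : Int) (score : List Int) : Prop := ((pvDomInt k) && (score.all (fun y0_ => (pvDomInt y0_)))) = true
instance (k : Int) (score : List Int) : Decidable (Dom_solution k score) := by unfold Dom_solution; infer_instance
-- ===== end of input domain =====

-- B keeps the hall of fame as an ascending sorted list (ordered insertion, min = head)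
-- instead of A's unordered list with repeated min() scans; alternative, same asymptotics.

-- ===== PORT A =====
-- min(stack); the default 0 is unreachable under Pre_solution (min([]) raises ValueError)
def pyMinD (l : List Int) : Int := (PySem.List.min? l (fun x => x)).getD 0

def stepA (k : Int) (st : List Int × List Int) (s : Int) : List Int × List Int :=
  let stack :=
    if (st.2.length : Int) < k then st.2 ++ [s]
    else if pyMinD st.2 < s then (PySem.List.remove? st.2 (pyMinD st.2)).getD st.2 ++ [s]
    else st.2
  (st.1 ++ [pyMinD stack], stack)

def solution (k : Int) (score : List Int) : List Int :=
  (score.foldl (stepA k) ([], [])).1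

-- ===== PORT B =====
-- _insort: the linear scan-and-insert of Source B, as structural recursion
def insAsc (s : Int) : List Int → List Int
  | [] => [s]
  | x :: xs => if x < s then x :: insAsc s xs else s :: x :: xs

-- top[0]; the default 0 is unreachable under Pre_solution (top[0] on [] raises IndexError)
def pyHeadD (l : List Int) : Int := (PySem.List.pyGet? l 0).getD 0

def stepB (k : Int) (st : List Int × List Int) (s : Int) : List Int × List Int :=
  let top :=
    if (st.2.length : Int) < k then insAsc s st.2
    else if pyHeadD st.2 < s then insAsc s st.2.tail
    else st.2
  (st.1 ++ [pyHeadD top], top)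

def solution_alt (k : Int) (score : List Int) : List Int :=
  (score.foldl (stepB k) ([], [])).1

-- ===== PRECONDITION & SPEC =====
-- Pre_ excludes k ≤ 0 with a nonempty score, where A raises ValueError (min of empty list)
-- and B raises IndexError (top[0] on an empty list).
def Pre_solution (k : Int) (score : List Int) : Prop := 1 ≤ k ∨ score = []
instance (k : Int) (score : List Int) : Decidable (Pre_solution k score) := by
  unfold Pre_solution; infer_instance

def pvWitness_solution : Int × List Int := (3, [10, 100, 20, 150, 1, 100, 200])

def Spec_solution (k : Int) (score : List Int) (out : List Int) : Prop := out = solution_alt k score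
instance (k : Int) (score : List Int) (out : List Int) : Decidable (Spec_solution k score out) := by unfold Spec_solution; infer_instance

-- ===== CLAIM (what is proved, stated in full; the proofs are below) =====
def Claim_equal_solution : Prop := ∀ (k : Int) (score : List Int), Dom_solution k score → Pre_solution k score → Spec_solution k score (solution k score)

-- ===== LEMMAS AND PROOFS =====

lemma insAsc_perm (s : Int) (l : List Int) : (insAsc s l).Perm (s :: l) := by
  induction l with
  | nil => simp [insAsc]
  | cons x xs ih =>
    simp only [insAsc]
    split
    · exact ((ih.cons x).trans (List.Perm.swap s x xs))
    · exact List.Perm.refl _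

lemma insAsc_sorted (s : Int) (l : List Int) (h : List.Pairwise (· ≤ ·) l) :
    List.Pairwise (· ≤ ·) (insAsc s l) := by
  induction l with
  | nil => simp [insAsc]
  | cons x xs ih =>
    simp only [insAsc]
    rw [List.pairwise_cons] at h
    split
    · rename_i hx
      rw [List.pairwise_cons]
      refine ⟨fun b hb => ?_, ih h.2⟩
      rcases List.mem_cons.mp ((insAsc_perm s xs).mem_iff.mp hb) with rfl | hb
      · exact le_of_lt hx
      · exact h.1 b hb
    · rename_i hx
      rw [List.pairwise_cons]
      refine ⟨fun b hb => ?_, List.pairwise_cons.mpr h⟩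
      rcases List.mem_cons.mp hb with rfl | hb
      · exact le_of_not_gt hx
      · exact le_trans (le_of_not_gt hx) (h.1 b hb)

lemma insAsc_ne_nil (s : Int) (l : List Int) : insAsc s l ≠ [] := by
  cases l with
  | nil => simp [insAsc]
  | cons x xs => simp only [insAsc]; split <;> simp

lemma pyHeadD_cons (a : Int) (t : List Int) : pyHeadD (a :: t) = a := by
  simp [pyHeadD, PySem.List.pyGet?, PySem.List.pyIdx?]

-- min over an unordered list = head of a sorted permutation
lemma min_head (l : List Int) (a : Int) (t : List Int) (hp : (a :: t).Perm l)
    (hs : List.Pairwise (· ≤ ·) (a :: t)) : pyMinD l = a := by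
  have hln : l ≠ [] := by
    intro h; subst h; exact absurd hp.length_eq (by simp)
  obtain ⟨v, hv⟩ := Option.ne_none_iff_exists'.mp
    (fun h => hln ((PySem.List.min?_eq_none_iff l (fun x : Int => x)).mp h))
  have hvm : v ∈ l := PySem.List.min?_mem hv
  have hmin : ∀ y ∈ l, v ≤ y := PySem.List.min?_isMin hv
  have hva : v ≤ a := hmin a (hp.mem_iff.mp (List.mem_cons_self))
  have hav : a ≤ v := by
    rcases List.mem_cons.mp (hp.mem_iff.mpr hvm) with h | h
    · exact le_of_eq h.symm
    · exact (List.pairwise_cons.mp hs).1 v h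
  simp [pyMinD, hv, le_antisymm hva hav]

-- one step preserves the relation and appends the same answer
lemma loop_eq (k : Int) (hk : 1 ≤ k) :
    ∀ (score ans astack btop : List Int), btop.Perm astack →
      List.Pairwise (· ≤ ·) btop →
      (score.foldl (stepA k) (ans, astack)).1 = (score.foldl (stepB k) (ans, btop)).1 := by
  intro score
  induction score with
  | nil => intro ans astack btop _ _; rfl
  | cons s rest ih =>
    intro ans astack btop hperm hsorted
    have hlen : btop.length = astack.length := hperm.length_eq
    simp only [List.foldl_cons]
    by_cases hsize : (astack.length : Int) < k
    · -- append branch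
      have hA : stepA k (ans, astack) s = (ans ++ [pyMinD (astack ++ [s])], astack ++ [s]) := by
        simp [stepA, hsize]
      have hB : stepB k (ans, btop) s = (ans ++ [pyHeadD (insAsc s btop)], insAsc s btop) := by
        simp [stepB, hlen, hsize]
      have hperm' : (insAsc s btop).Perm (astack ++ [s]) :=
        ((insAsc_perm s btop).trans (hperm.cons s)).trans (List.perm_append_singleton s astack).symm
      have hsorted' := insAsc_sorted s btop hsorted
      obtain ⟨a, t, hat⟩ : ∃ a t, insAsc s btop = a :: t := by
        cases h : insAsc s btop with
        | nil => exact absurd h (insAsc_ne_nil s btop)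
        | cons a t => exact ⟨a, t, rfl⟩
      have hans : pyMinD (astack ++ [s]) = pyHeadD (insAsc s btop) := by
        rw [min_head _ a t (hat ▸ hperm') (hat ▸ hsorted'), hat, pyHeadD_cons]
      rw [hA, hB, hans]
      exact ih _ _ _ hperm' hsorted'
    · -- hall of fame is full: btop is nonempty
      obtain ⟨a, t, hat⟩ : ∃ a t, btop = a :: t := by
        cases btop with
        | nil => exfalso; simp at hlen; omega
        | cons a t => exact ⟨a, t, rfl⟩
      have hmina : pyMinD astack = a := min_head astack a t (hat ▸ hperm) (hat ▸ hsorted)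
      have hheada : pyHeadD btop = a := by rw [hat, pyHeadD_cons]
      by_cases hlt : a < s
      · -- replace branch
        have hamem : a ∈ astack := hperm.mem_iff.mp (hat ▸ List.mem_cons_self)
        have hrem : PySem.List.remove? astack a = some (astack.erase a) :=
          PySem.List.remove?_eq_some_erase astack a hamem
        have hA : stepA k (ans, astack) s
            = (ans ++ [pyMinD (astack.erase a ++ [s])], astack.erase a ++ [s]) := by
          simp [stepA, hsize, hmina, hlt, hrem]
        have hlen' : t.length + 1 = astack.length := by simpa [hat] using hlen
        have hsizeB : ¬((t.length : Int) + 1 < k) := by omega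
        have hB : stepB k (ans, btop) s = (ans ++ [pyHeadD (insAsc s t)], insAsc s t) := by
          simp [stepB, hat, hsizeB, pyHeadD_cons, hlt]
        have hpt : t.Perm (astack.erase a) := by
          have := hperm.erase a
          rwa [hat, List.erase_cons_head] at this
        have hperm' : (insAsc s t).Perm (astack.erase a ++ [s]) :=
          ((insAsc_perm s t).trans (hpt.cons s)).trans (List.perm_append_singleton s _).symm
        have hsorted' : List.Pairwise (· ≤ ·) (insAsc s t) :=
          insAsc_sorted s t ((List.pairwise_cons.mp (hat ▸ hsorted)).2)
        obtain ⟨a', t', hat'⟩ : ∃ a' t', insAsc s t = a' :: t' := by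
          cases h : insAsc s t with
          | nil => exact absurd h (insAsc_ne_nil s t)
          | cons a' t' => exact ⟨a', t', rfl⟩
        have hans : pyMinD (astack.erase a ++ [s]) = pyHeadD (insAsc s t) := by
          rw [min_head _ a' t' (hat' ▸ hperm') (hat' ▸ hsorted'), hat', pyHeadD_cons]
        rw [hA, hB, hans]
        exact ih _ _ _ hperm' hsorted'
      · -- unchanged branch
        have hA : stepA k (ans, astack) s = (ans ++ [pyMinD astack], astack) := by
          simp [stepA, hsize, hmina, hlt]
        have hB : stepB k (ans, btop) s = (ans ++ [pyHeadD btop], btop) := by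
          simp [stepB, hlen, hsize, hheada, hlt]
        rw [hA, hB, hmina, hheada]
        exact ih _ _ _ hperm hsorted

-- ===== VERDICT (by name: the statement is the Claim_ definition above) =====
theorem solution_spec : Claim_equal_solution := by
  intro k score _ hpre
  unfold Spec_solution
  rcases hpre with hk | hnil
  · exact loop_eq k hk score [] [] [] (List.Perm.refl _) (by simp)
  · subst hnil; rfl
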